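-- pv_equiv track=rewrite | github.com/elBurg0/grizzly_py2sql | py2sqlcompiler/py_parser_025/Python3d2Lexer.py | getIndentationCount
-- ===== SOURCE A (Python) =====
-- def getIndentationCount(spaces):
--     count = 0
--     for ch in spaces:
--         if ch == '\t':
--             count += 8 - (count % 8)
--         else:
--             count += 1
--     return count
-- ===== SOURCE B (Python) =====
-- def getIndentationCount(spaces):
--     parts = spaces.split('\t')
--     count = 0
--     last = len(parts) - 1
--     for i in range(len(parts)):
--         count += len(parts[i])
--         if i != last:
--             count += 8 - (count % 8)
--     return count
-- ===== Notes on version B (the rewrite author's own statement) =====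
-- stated objective: faster
-- what changed: B splits the string on tabs once and processes whole segments (adding each segment's length and one snap-to-next-multiple-of-8 per separator) instead of A's per-character loop with a branch on every char.
import Mathlib
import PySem

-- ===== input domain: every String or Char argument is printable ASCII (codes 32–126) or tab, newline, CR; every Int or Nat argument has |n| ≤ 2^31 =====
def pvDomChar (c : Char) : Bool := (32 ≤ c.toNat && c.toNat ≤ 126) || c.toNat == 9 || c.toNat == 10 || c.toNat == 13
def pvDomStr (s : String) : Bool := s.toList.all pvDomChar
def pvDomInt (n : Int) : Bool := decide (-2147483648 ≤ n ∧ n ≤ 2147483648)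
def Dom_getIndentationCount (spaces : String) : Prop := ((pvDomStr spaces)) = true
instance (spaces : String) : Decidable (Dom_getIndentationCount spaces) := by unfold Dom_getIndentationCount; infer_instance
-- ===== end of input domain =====

-- B is an alternative decomposition: split on tabs once, add segment lengths with one snap per separator.

-- ===== PORT A =====
-- per-character loop: tab snaps count to the next multiple of 8, any other char adds 1
def getIndentationCount (spaces : String) : Int :=
  spaces.toList.foldl
    (fun count ch => if ch = '\t' then count + (8 - PySem.Int.mod count 8) else count + 1) 0

-- ===== PORT B =====
-- hand transliteration of str.split('\t') on the char list (exact for the single-char separator)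
def pvTabSplit : List Char → List (List Char)
  | [] => [[]]
  | c :: rest =>
    if c = '\t' then [] :: pvTabSplit rest
    else
      match pvTabSplit rest with
      | [] => [[c]]
      | p :: ps => (c :: p) :: ps

-- the loop of Source B over the segments: add the segment's length; snap after every segment but the last
def pvSegGo (count : Int) : List (List Char) → Int
  | [] => count
  | [seg] => count + (seg.length : Int)
  | seg :: rest =>
    pvSegGo ((count + (seg.length : Int)) + (8 - PySem.Int.mod (count + (seg.length : Int)) 8)) rest

def getIndentationCount_alt (spaces : String) : Int :=
  pvSegGo 0 (pvTabSplit spaces.toList)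

-- ===== PRECONDITION & SPEC =====
def Spec_getIndentationCount (spaces : String) (out : Int) : Prop := out = getIndentationCount_alt spaces
instance (spaces : String) (out : Int) : Decidable (Spec_getIndentationCount spaces out) := by unfold Spec_getIndentationCount; infer_instance

-- ===== CLAIM (what is proved, stated in full; the proofs are below) =====
def Claim_equal_getIndentationCount : Prop := ∀ (spaces : String), Dom_getIndentationCount spaces → Spec_getIndentationCount spaces (getIndentationCount spaces)

-- ===== LEMMAS AND PROOFS =====

theorem pvTabSplit_ne_nil (l : List Char) : pvTabSplit l ≠ [] := by
  cases l with
  | nil => simp [pvTabSplit]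
  | cons c rest =>
    simp only [pvTabSplit]
    split
    · simp
    · cases h : pvTabSplit rest <;> simp

theorem pvSegGo_nil_cons (c : Int) (ts : List (List Char)) (h : ts ≠ []) :
    pvSegGo c ([] :: ts) = pvSegGo (c + (8 - PySem.Int.mod c 8)) ts := by
  cases ts with
  | nil => exact absurd rfl h
  | cons t ts' => simp [pvSegGo]

theorem pvSegGo_cons_char (ch : Char) (seg : List Char) (rest : List (List Char)) (c : Int) :
    pvSegGo c ((ch :: seg) :: rest) = pvSegGo (c + 1) (seg :: rest) := by
  cases rest with
  | nil => simp [pvSegGo]; ring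
  | cons r rs =>
    simp only [pvSegGo]
    have h1 : c + ((ch :: seg).length : Int) = c + 1 + (seg.length : Int) := by
      push_cast [List.length_cons]; ring
    rw [h1]

theorem fold_eq_seg (l : List Char) :
    ∀ (c : Int),
      l.foldl (fun count ch => if ch = '\t' then count + (8 - PySem.Int.mod count 8) else count + 1) c
        = pvSegGo c (pvTabSplit l) := by
  induction l with
  | nil => intro c; simp [pvTabSplit, pvSegGo]
  | cons ch rest ih =>
    intro c
    simp only [List.foldl, pvTabSplit]
    by_cases h : ch = '\t'
    · simp only [h, if_true]
      rw [ih, pvSegGo_nil_cons _ _ (pvTabSplit_ne_nil rest)]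
    · simp only [if_neg h]
      rw [ih]
      cases hts : pvTabSplit rest with
      | nil => exact absurd hts (pvTabSplit_ne_nil rest)
      | cons p ps => rw [pvSegGo_cons_char]

-- ===== VERDICT (by name: the statement is the Claim_ definition above) =====
theorem getIndentationCount_spec : Claim_equal_getIndentationCount := by
  intro spaces _
  unfold Spec_getIndentationCount getIndentationCount getIndentationCount_alt
  exact fold_eq_seg spaces.toList 0
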